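-- pv_equiv track=rewrite | github.com/bkovitz/green-light-wiki | wiki/glwiki/HashFile.py | _backslash
-- ===== SOURCE A (Python) =====
-- def _backslash(s):
--     result = ""
--     for c in s:
--         if c == '"':
--             result += '"'
--         elif c == "\n":
--             result += "\\n"
--         else:
--             result += c
--
--     return result
-- ===== SOURCE B (Python) =====
-- def _backslash(s):
--     # closed form: the '"' branch of the original loop is a no-op,
--     # so the function only escapes newlines
--     return s.replace("\n", "\\n")
-- ===== Notes on version B (the rewrite author's own statement) =====
-- stated objective: simpler
-- what changed: Replaced the per-character accumulator loop (whose '"' branch is a no-op) with the closed form s.replace("\n", "\\n").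
import Mathlib
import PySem

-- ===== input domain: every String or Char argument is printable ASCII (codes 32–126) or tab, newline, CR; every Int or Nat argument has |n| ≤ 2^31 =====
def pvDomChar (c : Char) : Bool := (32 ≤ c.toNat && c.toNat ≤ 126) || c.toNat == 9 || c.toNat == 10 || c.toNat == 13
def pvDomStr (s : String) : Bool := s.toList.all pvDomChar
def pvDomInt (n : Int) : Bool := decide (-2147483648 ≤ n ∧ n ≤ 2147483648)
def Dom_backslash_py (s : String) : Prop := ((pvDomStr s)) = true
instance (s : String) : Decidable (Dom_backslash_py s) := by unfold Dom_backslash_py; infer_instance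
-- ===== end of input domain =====

-- B replaces A's per-character accumulator loop (whose '"' branch is a no-op)
-- with the closed form s.replace("\n", "\\n"); objective: simpler.


-- ===== PORT A =====
def backslash_py (s : String) : String :=
  s.toList.foldl
    (fun result c =>
      if c = '"' then result ++ "\""
      else if c = '\n' then result ++ "\\n"
      else result ++ String.singleton c) ""

-- ===== PORT B =====
def backslash_py_alt (s : String) : String :=
  PySem.Str.replace s "\n" "\\n"

-- ===== PRECONDITION & SPEC =====
def Spec_backslash_py (s : String) (out : String) : Prop := out = backslash_py_alt s
instance (s : String) (out : String) : Decidable (Spec_backslash_py s out) := by unfold Spec_backslash_py; infer_instance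

-- ===== CLAIM (what is proved, stated in full; the proofs are below) =====
def Claim_equal_backslash_py : Prop := ∀ (s : String), Dom_backslash_py s → Spec_backslash_py s (backslash_py s)

-- ===== LEMMAS AND PROOFS =====

/-- per-character expansion shared by both characterisations -/
def pvExpand (c : Char) : List Char := if c = '\n' then ['\\', 'n'] else [c]

theorem pv_go_eq (fuel : Nat) :
    ∀ (l acc : List Char), l.length ≤ fuel →
      PySem.Chars.replace.go ['\n'] ['\\', 'n'] fuel l acc
        = acc.reverse ++ l.flatMap pvExpand := by
  induction fuel with
  | zero =>
    intro l acc h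
    have : l = [] := List.eq_nil_of_length_eq_zero (Nat.le_zero.mp h)
    subst this
    simp [PySem.Chars.replace.go]
  | succ n ih =>
    intro l acc h
    cases l with
    | nil => simp [PySem.Chars.replace.go]
    | cons c t =>
      by_cases hc : c = '\n'
      · subst hc
        have hpre : List.isPrefixOf ['\n'] ('\n' :: t) = true := by
          simp [List.isPrefixOf]
        simp only [PySem.Chars.replace.go, hpre, if_pos,
          show List.drop ['\n'].length ('\n' :: t) = t from rfl]
        rw [ih t _ (by simpa using Nat.le_of_succ_le_succ h)]
        simp [pvExpand]
      · have hpre : List.isPrefixOf ['\n'] (c :: t) = false := by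
          simp [List.isPrefixOf]
          exact fun h => hc h.symm
        simp only [PySem.Chars.replace.go, hpre]
        rw [if_neg (by simp), ih t _ (by simpa using Nat.le_of_succ_le_succ h)]
        simp [pvExpand, hc]

theorem pv_foldA_eq (cs : List Char) :
    ∀ (r : String),
      (List.foldl
        (fun result c =>
          if c = '"' then result ++ "\""
          else if c = '\n' then result ++ "\\n"
          else result ++ String.singleton c) r cs).toList
        = r.toList ++ cs.flatMap pvExpand := by
  induction cs with
  | nil => intro r; simp
  | cons c t ih =>
    intro r
    by_cases hq : c = '"'
    · subst hq
      simp only [List.foldl_cons, ih]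
      simp [pvExpand]
    · by_cases hn : c = '\n'
      · subst hn
        simp only [List.foldl_cons, ih]
        rw [if_neg (by decide)]
        simp [pvExpand]
      · simp only [List.foldl_cons, if_neg hq, if_neg hn, ih]
        simp [pvExpand, hn, String.singleton]

-- ===== VERDICT (by name: the statement is the Claim_ definition above) =====
theorem backslash_py_spec : Claim_equal_backslash_py := by
  intro s _
  unfold Spec_backslash_py backslash_py backslash_py_alt PySem.Str.replace PySem.Chars.replace
  rw [if_neg (by decide)]
  have hgo := pv_go_eq s.toList.length s.toList [] le_rfl
  apply String.toList_injective
  rw [pv_foldA_eq]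
  simp only [String.toList_ofList]
  -- "\n".toList = ['\n'], "\\n".toList = ['\\','n']
  show [] ++ s.toList.flatMap pvExpand
      = PySem.Chars.replace.go "\n".toList "\\n".toList s.toList.length s.toList []
  rw [show "\n".toList = ['\n'] from rfl, show "\\n".toList = ['\\','n'] from rfl, hgo]
  simp
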